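-- pv_equiv track=rewrite | github.com/azheng-godaddy/data-validation-tool | cli.py | _generate_fallback_sql
-- ===== SOURCE A (Python) =====
-- def _generate_fallback_sql(validation_request: str, legacy_table: str, prod_table: str,
--                           date_column: str = None, start_date: str = None, end_date: str = None):
--     """Generate basic SQL queries when LLM fails, based on request keywords."""
--
--     request_lower = validation_request.lower()
--
--     # Build date filter if specified
--     date_filter = ""
--     if date_column and (start_date or end_date):
--         if start_date and end_date:
--             date_filter = f" WHERE {date_column} BETWEEN DATE '{start_date}' AND DATE '{end_date}'"
--         elif start_date:
--             date_filter = f" WHERE {date_column} >= DATE '{start_date}'"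
--         elif end_date:
--             date_filter = f" WHERE {date_column} <= DATE '{end_date}'"
--
--     # Generate SQL based on keywords in request
--     if any(word in request_lower for word in ['sample', 'preview', 'look', 'show']):
--         # Sample data - check this first since 'show' is common
--         return {
--             'legacy_sql': f"SELECT * FROM {legacy_table}{date_filter} LIMIT 10",
--             'prod_sql': f"SELECT * FROM {prod_table}{date_filter} LIMIT 10" if prod_table else f"SELECT * FROM {legacy_table}{date_filter} LIMIT 10",
--             'explanation': 'Sample data preview from tables'
--         }
--     elif any(word in request_lower for word in ['count', 'rows', 'total']):
--         # Row count comparison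
--         return {
--             'legacy_sql': f"SELECT COUNT(*) as row_count FROM {legacy_table}{date_filter}",
--             'prod_sql': f"SELECT COUNT(*) as row_count FROM {prod_table}{date_filter}" if prod_table else f"SELECT COUNT(*) as row_count FROM {legacy_table}{date_filter}",
--             'explanation': 'Row count comparison between tables'
--         }
--
--     elif any(word in request_lower for word in ['duplicate', 'duplicates']):
--         # Duplicate check - simpler approach since DISTINCT * doesn't work well in Athena
--         return {
--             'legacy_sql': f"SELECT COUNT(*) as total_rows FROM {legacy_table}{date_filter}",
--             'prod_sql': f"SELECT COUNT(*) as total_rows FROM {prod_table}{date_filter}" if prod_table else f"SELECT COUNT(*) as total_rows FROM {legacy_table}{date_filter}",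
--             'explanation': 'Row count for duplicate analysis (fallback - LLM would generate better duplicate detection SQL)'
--         }
--
--     elif any(word in request_lower for word in ['null', 'nulls', 'missing']):
--         # Null value check
--         return {
--             'legacy_sql': f"SELECT COUNT(*) as total_rows FROM {legacy_table}{date_filter}",
--             'prod_sql': f"SELECT COUNT(*) as total_rows FROM {prod_table}{date_filter}" if prod_table else f"SELECT COUNT(*) as total_rows FROM {legacy_table}{date_filter}",
--             'explanation': 'Basic row count for null analysis'
--         }
--
--
--
--     else:
--         # Default: row count
--         return {
--             'legacy_sql': f"SELECT COUNT(*) as row_count FROM {legacy_table}{date_filter}",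
--             'prod_sql': f"SELECT COUNT(*) as row_count FROM {prod_table}{date_filter}" if prod_table else f"SELECT COUNT(*) as row_count FROM {legacy_table}{date_filter}",
--             'explanation': 'Basic row count comparison'
--         }
-- ===== SOURCE B (Python) =====
-- def _generate_fallback_sql(validation_request: str, legacy_table: str, prod_table: str,
--                            date_column: str = None, start_date: str = None, end_date: str = None):
--     """Flattened keyword->priority map + min, then compositional query assembly."""
--     request_lower = validation_request.lower()
--
--     date_filter = ""
--     if date_column and (start_date or end_date):
--         if start_date and end_date:
--             cmp = f"BETWEEN DATE '{start_date}' AND DATE '{end_date}'"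
--         elif start_date:
--             cmp = f">= DATE '{start_date}'"
--         else:
--             cmp = f"<= DATE '{end_date}'"
--         date_filter = f" WHERE {date_column} {cmp}"
--
--     PRIO = {'sample': 0, 'preview': 0, 'look': 0, 'show': 0,
--             'count': 1, 'rows': 1, 'total': 1,
--             'duplicate': 2, 'duplicates': 2,
--             'null': 3, 'nulls': 3, 'missing': 3}
--     cat = min((p for w, p in PRIO.items() if w in request_lower), default=4)
--
--     if cat == 0:
--         select = "SELECT * FROM {}{} LIMIT 10".format
--     elif cat in (2, 3):
--         select = "SELECT COUNT(*) as total_rows FROM {}{}".format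
--     else:
--         select = "SELECT COUNT(*) as row_count FROM {}{}".format
--
--     explanation = ['Sample data preview from tables',
--                    'Row count comparison between tables',
--                    'Row count for duplicate analysis (fallback - LLM would generate better duplicate detection SQL)',
--                    'Basic row count for null analysis',
--                    'Basic row count comparison'][cat]
--
--     return {
--         'legacy_sql': select(legacy_table, date_filter),
--         'prod_sql': select(prod_table or legacy_table, date_filter),
--         'explanation': explanation,
--     }
-- ===== Notes on version B (the rewrite author's own statement) =====
-- stated objective: alternative
-- what changed: Replaces the if/elif chain of four per-branch dict literals by a flattened keyword->priority map whose minimum matching priority selects the category, with the SQL and explanation then assembled compositionally (one select template, one explanation list, one prod-table fallback) instead of being written out per branch.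
import Mathlib
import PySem

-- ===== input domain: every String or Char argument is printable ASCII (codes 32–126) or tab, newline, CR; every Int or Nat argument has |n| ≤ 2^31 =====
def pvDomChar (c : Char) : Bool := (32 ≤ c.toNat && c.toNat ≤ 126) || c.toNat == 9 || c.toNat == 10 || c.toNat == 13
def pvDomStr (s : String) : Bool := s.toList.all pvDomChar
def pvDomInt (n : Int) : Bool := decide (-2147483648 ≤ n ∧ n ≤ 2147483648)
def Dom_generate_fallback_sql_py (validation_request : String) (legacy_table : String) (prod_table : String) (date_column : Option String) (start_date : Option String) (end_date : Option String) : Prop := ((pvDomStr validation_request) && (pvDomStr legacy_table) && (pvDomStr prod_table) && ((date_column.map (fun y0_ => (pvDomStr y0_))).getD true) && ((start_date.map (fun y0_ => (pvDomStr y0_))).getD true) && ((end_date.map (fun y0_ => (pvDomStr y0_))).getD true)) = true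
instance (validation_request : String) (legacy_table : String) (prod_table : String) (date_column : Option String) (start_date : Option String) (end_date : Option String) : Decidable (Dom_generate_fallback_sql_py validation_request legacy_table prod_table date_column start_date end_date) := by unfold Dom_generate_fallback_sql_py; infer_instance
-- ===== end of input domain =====

-- B replaces A's if/elif chain of per-branch dict literals by a flattened keyword->priority
-- map whose minimum matching priority picks the category, assembling the SQL compositionally.

-- ===== PORT A =====
-- truthiness of a Python str / Optional[str]: non-empty string
def pvTruthyStr (s : String) : Bool := !s.toList.isEmpty
def pvTruthyOpt (o : Option String) : Bool := pvTruthyStr (o.getD "")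

def generate_fallback_sql_py (validation_request : String) (legacy_table : String) (prod_table : String) (date_column : Option String) (start_date : Option String) (end_date : Option String) : List (String × String) :=
  let request_lower := PySem.Str.lower validation_request
  let date_filter : String :=
    if pvTruthyOpt date_column && (pvTruthyOpt start_date || pvTruthyOpt end_date) then
      if pvTruthyOpt start_date && pvTruthyOpt end_date then
        " WHERE " ++ date_column.getD "" ++ " BETWEEN DATE '" ++ start_date.getD "" ++ "' AND DATE '" ++ end_date.getD "" ++ "'"
      else if pvTruthyOpt start_date then
        " WHERE " ++ date_column.getD "" ++ " >= DATE '" ++ start_date.getD "" ++ "'"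
      else if pvTruthyOpt end_date then
        " WHERE " ++ date_column.getD "" ++ " <= DATE '" ++ end_date.getD "" ++ "'"
      else ""
    else ""
  if (["sample", "preview", "look", "show"] : List String).any (fun w => PySem.Str.isIn w request_lower) then
    [("legacy_sql", "SELECT * FROM " ++ legacy_table ++ date_filter ++ " LIMIT 10"),
     ("prod_sql", if pvTruthyStr prod_table then "SELECT * FROM " ++ prod_table ++ date_filter ++ " LIMIT 10" else "SELECT * FROM " ++ legacy_table ++ date_filter ++ " LIMIT 10"),
     ("explanation", "Sample data preview from tables")]
  else if (["count", "rows", "total"] : List String).any (fun w => PySem.Str.isIn w request_lower) then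
    [("legacy_sql", "SELECT COUNT(*) as row_count FROM " ++ legacy_table ++ date_filter),
     ("prod_sql", if pvTruthyStr prod_table then "SELECT COUNT(*) as row_count FROM " ++ prod_table ++ date_filter else "SELECT COUNT(*) as row_count FROM " ++ legacy_table ++ date_filter),
     ("explanation", "Row count comparison between tables")]
  else if (["duplicate", "duplicates"] : List String).any (fun w => PySem.Str.isIn w request_lower) then
    [("legacy_sql", "SELECT COUNT(*) as total_rows FROM " ++ legacy_table ++ date_filter),
     ("prod_sql", if pvTruthyStr prod_table then "SELECT COUNT(*) as total_rows FROM " ++ prod_table ++ date_filter else "SELECT COUNT(*) as total_rows FROM " ++ legacy_table ++ date_filter),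
     ("explanation", "Row count for duplicate analysis (fallback - LLM would generate better duplicate detection SQL)")]
  else if (["null", "nulls", "missing"] : List String).any (fun w => PySem.Str.isIn w request_lower) then
    [("legacy_sql", "SELECT COUNT(*) as total_rows FROM " ++ legacy_table ++ date_filter),
     ("prod_sql", if pvTruthyStr prod_table then "SELECT COUNT(*) as total_rows FROM " ++ prod_table ++ date_filter else "SELECT COUNT(*) as total_rows FROM " ++ legacy_table ++ date_filter),
     ("explanation", "Basic row count for null analysis")]
  else
    [("legacy_sql", "SELECT COUNT(*) as row_count FROM " ++ legacy_table ++ date_filter),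
     ("prod_sql", if pvTruthyStr prod_table then "SELECT COUNT(*) as row_count FROM " ++ prod_table ++ date_filter else "SELECT COUNT(*) as row_count FROM " ++ legacy_table ++ date_filter),
     ("explanation", "Basic row count comparison")]

-- ===== PORT B =====
-- Source B's PRIO dict, in insertion order
def pvPrio : List (String × Nat) :=
  [("sample", 0), ("preview", 0), ("look", 0), ("show", 0),
   ("count", 1), ("rows", 1), ("total", 1),
   ("duplicate", 2), ("duplicates", 2),
   ("null", 3), ("nulls", 3), ("missing", 3)]

-- Source B's `min((p for w, p in PRIO.items() if w in request_lower), default=4)`: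
-- the stdlib min with default 4 equals a min-fold starting from 4 (all priorities are < 4)
def pvMinPrio (request_lower : String) : Nat :=
  pvPrio.foldl (fun acc wp => if PySem.Str.isIn wp.1 request_lower then min acc wp.2 else acc) 4

def generate_fallback_sql_py_alt (validation_request : String) (legacy_table : String) (prod_table : String) (date_column : Option String) (start_date : Option String) (end_date : Option String) : List (String × String) :=
  let request_lower := PySem.Str.lower validation_request
  let date_filter : String :=
    if pvTruthyOpt date_column && (pvTruthyOpt start_date || pvTruthyOpt end_date) then
      let cmp : String :=
        if pvTruthyOpt start_date && pvTruthyOpt end_date then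
          "BETWEEN DATE '" ++ start_date.getD "" ++ "' AND DATE '" ++ end_date.getD "" ++ "'"
        else if pvTruthyOpt start_date then
          ">= DATE '" ++ start_date.getD "" ++ "'"
        else
          "<= DATE '" ++ end_date.getD "" ++ "'"
      " WHERE " ++ date_column.getD "" ++ " " ++ cmp
    else ""
  let cat := pvMinPrio request_lower
  let select : String → String → String :=
    if cat = 0 then fun t f => "SELECT * FROM " ++ t ++ f ++ " LIMIT 10"
    else if cat = 2 ∨ cat = 3 then fun t f => "SELECT COUNT(*) as total_rows FROM " ++ t ++ f
    else fun t f => "SELECT COUNT(*) as row_count FROM " ++ t ++ f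
  -- list indexing explanations[cat]: cat ≤ 4 always, so getD is exact
  let explanation :=
    (["Sample data preview from tables",
      "Row count comparison between tables",
      "Row count for duplicate analysis (fallback - LLM would generate better duplicate detection SQL)",
      "Basic row count for null analysis",
      "Basic row count comparison"] : List String).getD cat ""
  [("legacy_sql", select legacy_table date_filter),
   ("prod_sql", select (if pvTruthyStr prod_table then prod_table else legacy_table) date_filter),
   ("explanation", explanation)]

-- ===== PRECONDITION & SPEC =====
def Spec_generate_fallback_sql_py (validation_request : String) (legacy_table : String) (prod_table : String) (date_column : Option String) (start_date : Option String) (end_date : Option String) (out : List (String × String)) : Prop := out = generate_fallback_sql_py_alt validation_request legacy_table prod_table date_column start_date end_date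
instance (validation_request : String) (legacy_table : String) (prod_table : String) (date_column : Option String) (start_date : Option String) (end_date : Option String) (out : List (String × String)) : Decidable (Spec_generate_fallback_sql_py validation_request legacy_table prod_table date_column start_date end_date out) := by unfold Spec_generate_fallback_sql_py; infer_instance

-- ===== CLAIM =====
def Claim_equal_generate_fallback_sql_py : Prop := ∀ (validation_request : String) (legacy_table : String) (prod_table : String) (date_column : Option String) (start_date : Option String) (end_date : Option String), Dom_generate_fallback_sql_py validation_request legacy_table prod_table date_column start_date end_date → Spec_generate_fallback_sql_py validation_request legacy_table prod_table date_column start_date end_date (generate_fallback_sql_py validation_request legacy_table prod_table date_column start_date end_date)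

-- ===== LEMMAS AND PROOFS =====

-- merging the space of f" WHERE {col} {cmp}" into the comparison literal
theorem pvSpBetween (a : String) : (" " : String) ++ ("BETWEEN DATE '" ++ a) = " BETWEEN DATE '" ++ a := by
  rw [← String.append_assoc, show (" " : String) ++ "BETWEEN DATE '" = " BETWEEN DATE '" from rfl]
theorem pvSpGe (a : String) : (" " : String) ++ (">= DATE '" ++ a) = " >= DATE '" ++ a := by
  rw [← String.append_assoc, show (" " : String) ++ ">= DATE '" = " >= DATE '" from rfl]
theorem pvSpLe (a : String) : (" " : String) ++ ("<= DATE '" ++ a) = " <= DATE '" ++ a := by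
  rw [← String.append_assoc, show (" " : String) ++ "<= DATE '" = " <= DATE '" from rfl]

-- A's nested-if date filter equals B's " WHERE {col} {cmp}" form
theorem pv_df_eq (dc sd ed : Option String) :
    (if pvTruthyOpt dc && (pvTruthyOpt sd || pvTruthyOpt ed) then
       if pvTruthyOpt sd && pvTruthyOpt ed then
         " WHERE " ++ dc.getD "" ++ " BETWEEN DATE '" ++ sd.getD "" ++ "' AND DATE '" ++ ed.getD "" ++ "'"
       else if pvTruthyOpt sd then
         " WHERE " ++ dc.getD "" ++ " >= DATE '" ++ sd.getD "" ++ "'"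
       else if pvTruthyOpt ed then
         " WHERE " ++ dc.getD "" ++ " <= DATE '" ++ ed.getD "" ++ "'"
       else ""
     else "") =
    (if pvTruthyOpt dc && (pvTruthyOpt sd || pvTruthyOpt ed) then
       " WHERE " ++ dc.getD "" ++ " " ++
         (if pvTruthyOpt sd && pvTruthyOpt ed then
            "BETWEEN DATE '" ++ sd.getD "" ++ "' AND DATE '" ++ ed.getD "" ++ "'"
          else if pvTruthyOpt sd then
            ">= DATE '" ++ sd.getD "" ++ "'"
          else
            "<= DATE '" ++ ed.getD "" ++ "'")
     else "") := by
  split_ifs <;> simp_all [String.append_assoc, pvSpBetween, pvSpGe, pvSpLe]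

-- the min-fold over the flattened priority list, as a function of the 12 membership booleans
theorem pvMinPrio_bool (b1 b2 b3 b4 b5 b6 b7 b8 b9 b10 b11 b12 : Bool) :
    ([((0:Nat),b1),(0,b2),(0,b3),(0,b4),(1,b5),(1,b6),(1,b7),(2,b8),(2,b9),(3,b10),(3,b11),(3,b12)]).foldl
        (fun acc pb => if pb.2 then min acc pb.1 else acc) 4 =
    (if b1 || (b2 || (b3 || b4)) then 0
     else if b5 || (b6 || b7) then 1
     else if b8 || b9 then 2
     else if b10 || (b11 || b12) then 3
     else 4) := by
  revert b1 b2 b3 b4 b5 b6 b7 b8 b9 b10 b11 b12; decide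

-- the min over the flattened keyword map equals the first-matching-group priority
theorem pvMinPrio_eq (rl : String) :
    pvMinPrio rl =
    (if PySem.Str.isIn "sample" rl || (PySem.Str.isIn "preview" rl || (PySem.Str.isIn "look" rl || PySem.Str.isIn "show" rl)) then 0
     else if PySem.Str.isIn "count" rl || (PySem.Str.isIn "rows" rl || PySem.Str.isIn "total" rl) then 1
     else if PySem.Str.isIn "duplicate" rl || PySem.Str.isIn "duplicates" rl then 2
     else if PySem.Str.isIn "null" rl || (PySem.Str.isIn "nulls" rl || PySem.Str.isIn "missing" rl) then 3
     else 4) := by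
  have h := pvMinPrio_bool (PySem.Str.isIn "sample" rl) (PySem.Str.isIn "preview" rl)
    (PySem.Str.isIn "look" rl) (PySem.Str.isIn "show" rl) (PySem.Str.isIn "count" rl)
    (PySem.Str.isIn "rows" rl) (PySem.Str.isIn "total" rl) (PySem.Str.isIn "duplicate" rl)
    (PySem.Str.isIn "duplicates" rl) (PySem.Str.isIn "null" rl) (PySem.Str.isIn "nulls" rl)
    (PySem.Str.isIn "missing" rl)
  simpa only [pvMinPrio, pvPrio, List.foldl] using h

-- ===== VERDICT =====
set_option maxHeartbeats 4000000 in
theorem generate_fallback_sql_py_spec : Claim_equal_generate_fallback_sql_py := by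
  intro vr lt pt dc sd ed _
  unfold Spec_generate_fallback_sql_py
  simp only [generate_fallback_sql_py, generate_fallback_sql_py_alt, List.any_cons, List.any_nil,
    Bool.or_false, pvMinPrio_eq, pv_df_eq]
  by_cases h1 : (PySem.Str.isIn "sample" (PySem.Str.lower vr) || (PySem.Str.isIn "preview" (PySem.Str.lower vr) || (PySem.Str.isIn "look" (PySem.Str.lower vr) || PySem.Str.isIn "show" (PySem.Str.lower vr)))) = true <;>
  by_cases h2 : (PySem.Str.isIn "count" (PySem.Str.lower vr) || (PySem.Str.isIn "rows" (PySem.Str.lower vr) || PySem.Str.isIn "total" (PySem.Str.lower vr))) = true <;>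
  by_cases h3 : (PySem.Str.isIn "duplicate" (PySem.Str.lower vr) || PySem.Str.isIn "duplicates" (PySem.Str.lower vr)) = true <;>
  by_cases h4 : (PySem.Str.isIn "null" (PySem.Str.lower vr) || (PySem.Str.isIn "nulls" (PySem.Str.lower vr) || PySem.Str.isIn "missing" (PySem.Str.lower vr))) = true <;>
  simp only [h1, h2, h3, h4, if_true, if_false, Bool.false_eq_true] <;>
  split_ifs <;> simp_all
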